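-- pv_equiv track=rewrite | github.com/jaxwang/relay_station | app.py | split_and_combine
-- ===== SOURCE A (Python) =====
-- def split_and_combine(text):
--     sentences = []
--     current_sentence = ""
--     for char in text:
--         current_sentence += char
--         if char in ['.', '?', '!']:
--             sentences.append(current_sentence)
--             current_sentence = ""
--
--     if len(sentences) == 0:
--         return text
--
--     current_string = ""
--     for sentence in sentences:
--         current_string += sentence
--         if len(current_string) >= 80:
--             break
--     return current_string
-- ===== SOURCE B (Python) =====
-- def split_and_combine(text):
--     last = None
--     for i, ch in enumerate(text):
--         if ch in ('.', '?', '!'):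
--             if i + 1 >= 80:
--                 return text[:i + 1]
--             last = i
--     if last is None:
--         return text
--     return text[:last + 1]
-- ===== Notes on version B (the rewrite author's own statement) =====
-- stated objective: simpler
-- what changed: Replaces A's two-pass build-a-sentence-list-then-reconcatenate structure with a single index scan that remembers the last punctuation position and returns one slice of the input.
import Mathlib
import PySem

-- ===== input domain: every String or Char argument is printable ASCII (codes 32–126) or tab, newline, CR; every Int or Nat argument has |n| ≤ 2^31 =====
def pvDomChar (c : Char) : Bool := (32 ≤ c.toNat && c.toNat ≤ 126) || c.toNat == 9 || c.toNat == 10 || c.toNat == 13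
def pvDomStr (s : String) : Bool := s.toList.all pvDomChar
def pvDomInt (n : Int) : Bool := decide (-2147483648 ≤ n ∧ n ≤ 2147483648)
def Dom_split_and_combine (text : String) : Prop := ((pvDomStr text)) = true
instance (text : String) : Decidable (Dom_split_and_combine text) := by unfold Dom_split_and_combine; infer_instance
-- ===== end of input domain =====

-- B replaces A's two-pass sentence-list build + reconcatenation by a single index scan
-- remembering the last punctuation position, returning one slice (objective: simpler).

-- ===== PORT A =====
-- first loop of A: split into sentences (each ending at '.', '?' or '!'), leftover returned second
def aSplit : List Char → List Char → List (List Char) → List (List Char) × List Char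
  | [], cur, acc => (acc, cur)
  | c :: rest, cur, acc =>
    if c ∈ ['.', '?', '!'] then aSplit rest [] (acc ++ [cur ++ [c]])
    else aSplit rest (cur ++ [c]) acc

-- second loop of A: concatenate sentences, break once length ≥ 80
def aCombine : List (List Char) → List Char → List Char
  | [], s => s
  | x :: xs, s =>
    let s' := s ++ x
    if 80 ≤ s'.length then s' else aCombine xs s'

def split_and_combine (text : String) : String :=
  let cs := text.toList
  let ss := (aSplit cs [] []).1
  if ss = [] then text
  else String.mk (aCombine ss [])

-- ===== PORT B =====
-- single scan: returns the cut position — some i as soon as a punctuation char at index i has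
-- i+1 ≥ 80 (early return), otherwise the last punctuation index seen (none if never)
def altScan : List Char → Nat → Option Nat → Option Nat
  | [], _, last => last
  | c :: rest, i, last =>
    if c == '.' || c == '?' || c == '!' then
      if 80 ≤ i + 1 then some i
      else altScan rest (i + 1) (some i)
    else altScan rest (i + 1) last

def split_and_combine_alt (text : String) : String :=
  let cs := text.toList
  match altScan cs 0 none with
  | none => text
  | some j => String.mk (cs.take (j + 1))

-- ===== PRECONDITION & SPEC =====
def Spec_split_and_combine (text : String) (out : String) : Prop := out = split_and_combine_alt text
instance (text : String) (out : String) : Decidable (Spec_split_and_combine text out) := by unfold Spec_split_and_combine; infer_instance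

-- ===== CLAIM (what is proved, stated in full; the proofs are below) =====
def Claim_equal_split_and_combine : Prop := ∀ (text : String), Dom_split_and_combine text → Spec_split_and_combine text (split_and_combine text)

-- ===== LEMMAS AND PROOFS =====

-- the two ports test punctuation with syntactically different conditions; they agree
theorem punct_eq (c : Char) :
    ((c == '.' || c == '?' || c == '!') = true) ↔ (c ∈ ['.', '?', '!']) := by
  simp [or_assoc]

-- take of an append at exactly the first part's length
theorem take_exact (l1 l2 : List Char) (n : Nat) (h : n = l1.length) :
    (l1 ++ l2).take n = l1 := by
  subst h; simp

theorem aSplit_acc (rest : List Char) : ∀ cur acc,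
    (aSplit rest cur acc).1 = acc ++ (aSplit rest cur []).1 := by
  induction rest with
  | nil => intro cur acc; simp [aSplit]
  | cons c rest ih =>
    intro cur acc
    by_cases hc : c ∈ ['.', '?', '!']
    · simp only [aSplit, if_pos hc]
      rw [ih [] (acc ++ [cur ++ [c]]), ih [] ([] ++ [cur ++ [c]])]
      simp
    · simp only [aSplit, if_neg hc]
      exact ih _ acc

theorem altScan_some (rest : List Char) : ∀ i j, altScan rest i (some j) ≠ none := by
  induction rest with
  | nil => intro i j; simp [altScan]
  | cons c rest ih =>
    intro i j
    by_cases hc : (c == '.' || c == '?' || c == '!') = true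
    · simp only [altScan, if_pos hc]
      split
      · simp
      · exact ih _ _
    · simp only [altScan, if_neg hc]
      exact ih _ _

theorem empty_iff (rest : List Char) : ∀ cur i,
    ((aSplit rest cur []).1 = [] ↔ altScan rest i none = none) := by
  induction rest with
  | nil => intro cur i; simp [aSplit, altScan]
  | cons c rest ih =>
    intro cur i
    by_cases hc : c ∈ ['.', '?', '!']
    · have hb : (c == '.' || c == '?' || c == '!') = true := (punct_eq c).2 hc
      simp only [aSplit, if_pos hc, altScan, hb, if_pos trivial]
      rw [aSplit_acc]
      constructor
      · intro h; exact absurd h (by simp)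
      · intro h
        exfalso
        by_cases h80 : 80 ≤ i + 1
        · rw [if_pos h80] at h; simp at h
        · rw [if_neg h80] at h; exact altScan_some rest (i + 1) i h
    · have hb : ¬ ((c == '.' || c == '?' || c == '!') = true) := fun h => hc ((punct_eq c).1 h)
      simp only [aSplit, if_neg hc, altScan, if_neg hb]
      exact ih (cur ++ [c]) (i + 1)

-- main invariant after the first punctuation has been consumed:
-- s is the text consumed so far (ending at punctuation index jin), cur the pending sentence;
-- A's combine over the remaining sentences is a take at B's cut index.
theorem combine_eq (rest : List Char) : ∀ cur s jin j, jin + 1 = s.length →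
    altScan rest (s.length + cur.length) (some jin) = some j →
    aCombine ((aSplit rest cur []).1) s = (s ++ cur ++ rest).take (j + 1) := by
  induction rest with
  | nil =>
    intro cur s jin j hlen h
    simp only [altScan, Option.some.injEq] at h
    subst h
    simp only [aSplit, aCombine]
    rw [List.append_nil, take_exact s cur _ hlen]
  | cons c rest ih =>
    intro cur s jin j hlen h
    by_cases hc : c ∈ ['.', '?', '!']
    · have hb : (c == '.' || c == '?' || c == '!') = true := (punct_eq c).2 hc
      rw [altScan] at h
      rw [hb] at h
      simp only [if_true] at h
      have hsp : (aSplit (c :: rest) cur []).1 = (cur ++ [c]) :: (aSplit rest [] []).1 := by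
        simp only [aSplit, if_pos hc]
        rw [aSplit_acc]
        simp
      rw [hsp]
      by_cases h80 : 80 ≤ s.length + cur.length + 1
      · rw [if_pos h80] at h
        simp only [Option.some.injEq] at h
        subst h
        have hcmb : aCombine ((cur ++ [c]) :: (aSplit rest [] []).1) s = s ++ (cur ++ [c]) := by
          simp only [aCombine]
          rw [if_pos (by simp only [List.length_append, List.length_cons, List.length_nil]; omega)]
        rw [hcmb]
        rw [show s ++ cur ++ c :: rest = (s ++ (cur ++ [c])) ++ rest by simp]
        rw [take_exact _ rest _ (by simp only [List.length_append, List.length_cons, List.length_nil]; omega)]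
      · rw [if_neg h80] at h
        have hstep : aCombine ((cur ++ [c]) :: (aSplit rest [] []).1) s
            = aCombine ((aSplit rest [] []).1) (s ++ (cur ++ [c])) := by
          simp only [aCombine]
          rw [if_neg (by simp only [List.length_append, List.length_cons, List.length_nil]; omega)]
        rw [hstep]
        have := ih [] (s ++ (cur ++ [c])) (s.length + cur.length) j
          (by simp only [List.length_append, List.length_cons, List.length_nil]; omega)
          (by
            simp only [List.length_append, List.length_cons, List.length_nil]
            rw [show s.length + (cur.length + 1) + 0 = s.length + cur.length + 1 by omega]
            exact h)
        rw [this]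
        simp [List.append_assoc]
    · have hb : ¬ ((c == '.' || c == '?' || c == '!') = true) := fun h => hc ((punct_eq c).1 h)
      rw [altScan] at h
      rw [Bool.of_not_eq_true hb] at h
      simp only [Bool.false_eq_true, if_false] at h
      have hsp : aSplit (c :: rest) cur ([] : List (List Char)) = aSplit rest (cur ++ [c]) [] := by
        simp only [aSplit, if_neg hc]
      rw [hsp]
      have := ih (cur ++ [c]) s jin j hlen
        (by
          simp only [List.length_append, List.length_cons, List.length_nil]
          rw [show s.length + (cur.length + 1) = s.length + cur.length + 1 by omega]
          exact h)
      rw [this]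
      simp [List.append_assoc]

-- the phase before the first punctuation: cur is the pending first sentence
theorem combine_eq0 (rest : List Char) : ∀ cur j,
    altScan rest cur.length none = some j →
    aCombine ((aSplit rest cur []).1) [] = (cur ++ rest).take (j + 1) := by
  induction rest with
  | nil => intro cur j h; simp [altScan] at h
  | cons c rest ih =>
    intro cur j h
    by_cases hc : c ∈ ['.', '?', '!']
    · have hb : (c == '.' || c == '?' || c == '!') = true := (punct_eq c).2 hc
      rw [altScan] at h
      rw [hb] at h
      simp only [if_true] at h
      have hsp : (aSplit (c :: rest) cur []).1 = (cur ++ [c]) :: (aSplit rest [] []).1 := by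
        simp only [aSplit, if_pos hc]
        rw [aSplit_acc]
        simp
      rw [hsp]
      by_cases h80 : 80 ≤ cur.length + 1
      · rw [if_pos h80] at h
        simp only [Option.some.injEq] at h
        subst h
        have hcmb : aCombine ((cur ++ [c]) :: (aSplit rest [] []).1) [] = cur ++ [c] := by
          simp only [aCombine]
          rw [if_pos (by simp only [List.nil_append, List.length_append, List.length_cons, List.length_nil]; omega)]
          simp
        rw [hcmb]
        rw [show cur ++ c :: rest = (cur ++ [c]) ++ rest by simp]
        rw [take_exact _ rest _ (by simp only [List.length_append, List.length_cons, List.length_nil])]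
      · rw [if_neg h80] at h
        have hstep : aCombine ((cur ++ [c]) :: (aSplit rest [] []).1) []
            = aCombine ((aSplit rest [] []).1) (cur ++ [c]) := by
          simp only [aCombine]
          rw [if_neg (by simp only [List.nil_append, List.length_append, List.length_cons, List.length_nil]; omega)]
          simp
        rw [hstep]
        have := combine_eq rest [] (cur ++ [c]) cur.length j
          (by simp)
          (by
            simp only [List.length_append, List.length_cons, List.length_nil]
            rw [show cur.length + 1 + 0 = cur.length + 1 by omega]
            exact h)
        rw [this]
        simp
    · have hb : ¬ ((c == '.' || c == '?' || c == '!') = true) := fun h => hc ((punct_eq c).1 h)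
      rw [altScan] at h
      rw [Bool.of_not_eq_true hb] at h
      simp only [Bool.false_eq_true, if_false] at h
      have hsp : aSplit (c :: rest) cur ([] : List (List Char)) = aSplit rest (cur ++ [c]) [] := by
        simp only [aSplit, if_neg hc]
      rw [hsp]
      have := ih (cur ++ [c]) j
        (by
          simp only [List.length_append, List.length_cons, List.length_nil]
          rw [show cur.length + 1 = cur.length + 1 by rfl]
          exact h)
      rw [this]
      simp

-- ===== VERDICT (by name: the statement is the Claim_ definition above) =====
theorem split_and_combine_spec : Claim_equal_split_and_combine := by
  intro text _
  unfold Spec_split_and_combine split_and_combine split_and_combine_alt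
  cases h : altScan text.toList 0 none with
  | none =>
    have he : (aSplit text.toList [] []).1 = [] := (empty_iff text.toList [] 0).2 h
    simp [he, h]
  | some j =>
    have hne : (aSplit text.toList [] []).1 ≠ [] := by
      intro he
      rw [(empty_iff text.toList [] 0).1 he] at h
      simp at h
    have hcmb := combine_eq0 text.toList [] j (by simpa using h)
    simp [hne, h, hcmb]
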